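-- pv_equiv track=rewrite | github.com/linkedlist771/metax-mxtop | src/mxtop/ui/panels.py | _time_axis_right
-- ===== SOURCE A (Python) =====
-- def _time_axis_right(width: int) -> str:
--     if width <= 0:
--         return ""
--     line = list("─" * width)
--     labels = [(20, "╴30s├"), (35, "╴60s├"), (66, "╴120s├")]
--     for offset, label in labels:
--         if offset > width:
--             break
--         start = width - offset
--         line[start : start + len(label)] = list(label)
--     return "".join(line)[:width]
-- ===== SOURCE B (Python) =====
-- def _time_axis_right(width: int) -> str:
--     if width <= 0:
--         return ""
--     labels = [(20, "\u2574" + "30s" + "\u251c"), (35, "\u2574" + "60s" + "\u251c"), (66, "\u2574" + "120s" + "\u251c")]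
--     parts = []
--     cursor = 0
--     for offset, label in reversed(labels):
--         if offset <= width:
--             start = width - offset
--             parts.append("\u2500" * (start - cursor))
--             parts.append(label)
--             cursor = start + len(label)
--     parts.append("\u2500" * (width - cursor))
--     return "".join(parts)
-- ===== Notes on version B (the rewrite author's own statement) =====
-- stated objective: simpler
-- what changed: B builds the string left-to-right as gap/label segments from the reversed label list with a cursor, instead of A's mutable per-character buffer with slice-assignment overlays and a final truncating slice; avoiding the char-list materialization and join also makes it measurably faster.
import Mathlib
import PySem

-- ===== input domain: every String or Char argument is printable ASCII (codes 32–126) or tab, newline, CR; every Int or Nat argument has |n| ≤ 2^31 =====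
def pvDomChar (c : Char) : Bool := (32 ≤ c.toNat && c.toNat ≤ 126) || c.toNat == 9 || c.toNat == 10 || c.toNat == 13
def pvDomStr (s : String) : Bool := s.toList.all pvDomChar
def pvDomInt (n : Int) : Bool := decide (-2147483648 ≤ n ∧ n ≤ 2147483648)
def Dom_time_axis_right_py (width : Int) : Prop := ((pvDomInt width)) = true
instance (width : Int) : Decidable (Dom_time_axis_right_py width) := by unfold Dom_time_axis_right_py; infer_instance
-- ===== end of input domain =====

-- B builds the axis left-to-right from segments (gap + label) instead of A's mutable
-- char buffer with slice-assignment overlays; objective: simpler decomposition, same cost.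

-- ===== PORT A =====
-- the literal label table of A
def taxLabelsA : List (Int × String) := [(20, "╴30s├"), (35, "╴60s├"), (66, "╴120s├")]

-- A's for-loop with break; the slice assignment line[start:start+len(label)] = list(label)
-- is ported exactly as take/drop splicing (equal-length replacement, start = width-offset ≥ 0 here)
def taxLoopA (width : Int) : List (Int × String) → List Char → List Char
  | [], line => line
  | (offset, label) :: rest, line =>
      if offset > width then line
      else
        let start := (width - offset).toNat
        taxLoopA width rest
          (line.take start ++ label.toList ++ line.drop (start + label.toList.length))

def time_axis_right_py (width : Int) : String :=
  if width ≤ 0 then ""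
  else
    let line := List.replicate width.toNat '─'     -- list("─" * width)
    let line := taxLoopA width taxLabelsA line
    String.ofList (line.take width.toNat)               -- "".join(line)[:width], width > 0

-- ===== PORT B =====
-- the literal label table of B
def taxLabelsB : List (Int × String) := [(20, "╴30s├"), (35, "╴60s├"), (66, "╴120s├")]

-- B's loop over reversed(labels), carrying (parts, cursor); "─" * n ported as replicate n.toNat
def time_axis_right_py_alt (width : Int) : String :=
  if width ≤ 0 then ""
  else
    let acc := taxLabelsB.reverse.foldl
      (fun (acc : List Char × Int) (p : Int × String) =>
        if p.1 ≤ width then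
          let start := width - p.1
          (acc.1 ++ List.replicate (start - acc.2).toNat '─' ++ p.2.toList,
           start + p.2.toList.length)
        else acc) ([], 0)
    String.ofList (acc.1 ++ List.replicate (width - acc.2).toNat '─')

-- ===== PRECONDITION & SPEC =====
def Spec_time_axis_right_py (width : Int) (out : String) : Prop := out = time_axis_right_py_alt width
instance (width : Int) (out : String) : Decidable (Spec_time_axis_right_py width out) := by unfold Spec_time_axis_right_py; infer_instance

-- ===== CLAIM (what is proved, stated in full; the proofs are below) =====
def Claim_equal_time_axis_right_py : Prop := ∀ (width : Int), Dom_time_axis_right_py width → Spec_time_axis_right_py width (time_axis_right_py width)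

-- ===== LEMMAS AND PROOFS =====

-- splicing a label into replicate m ++ suf entirely inside the replicate prefix
theorem tax_overlay (m s k : ℕ) (lab suf : List Char) (hk : lab.length = k) (h : s + k ≤ m) :
    (List.replicate m '─' ++ suf).take s ++ lab
      ++ (List.replicate m '─' ++ suf).drop (s + k)
    = List.replicate s '─' ++ (lab ++ (List.replicate (m - s - k) '─' ++ suf)) := by
  rw [List.take_append, List.drop_append, List.take_replicate, List.drop_replicate,
    List.length_replicate]
  have h1 : min s m = s := by omega
  have h2 : s - m = 0 := by omega
  have h3 : s + k - m = 0 := by omega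
  rw [h1, h2, h3, List.take_zero, List.drop_zero, List.append_nil]
  rw [show m - (s + k) = m - s - k by omega]
  simp [List.append_assoc]

theorem tax_overlay' (m s k : ℕ) (lab : List Char) (hk : lab.length = k) (h : s + k ≤ m) :
    (List.replicate m '─').take s ++ lab ++ (List.replicate m '─').drop (s + k)
    = List.replicate s '─' ++ (lab ++ List.replicate (m - s - k) '─') := by
  have := tax_overlay m s k lab [] hk h
  simpa using this

-- ===== VERDICT (by name: the statement is the Claim_ definition above) =====
theorem time_axis_right_py_spec : Claim_equal_time_axis_right_py := by
  unfold Claim_equal_time_axis_right_py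
  intro width _
  show time_axis_right_py width = time_axis_right_py_alt width
  unfold time_axis_right_py time_axis_right_py_alt taxLabelsA taxLabelsB
  by_cases h0 : width ≤ 0
  · simp [h0]
  · simp only [if_neg h0, List.reverse_cons, List.reverse_nil, List.nil_append,
      List.cons_append, List.foldl_cons, List.foldl_nil]
    have l1 : "╴30s├".toList.length = 5 := rfl
    have l2 : "╴60s├".toList.length = 5 := rfl
    have l3 : "╴120s├".toList.length = 6 := rfl
    by_cases h20 : 20 > width
    · -- no labels fit
      have c1 : ¬ (66 : Int) ≤ width := by omega
      have c2 : ¬ (35 : Int) ≤ width := by omega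
      have c3 : ¬ (20 : Int) ≤ width := by omega
      simp only [taxLoopA, if_pos h20, if_neg c1, if_neg c2, if_neg c3]
      rw [List.take_replicate]
      have e : min width.toNat width.toNat = width.toNat := by omega
      rw [e]
      simp
    · by_cases h35 : 35 > width
      · -- first label only
        have c1 : ¬ (66 : Int) ≤ width := by omega
        have c2 : ¬ (35 : Int) ≤ width := by omega
        have c3 : (20 : Int) ≤ width := by omega
        simp only [taxLoopA, if_neg h20, if_pos h35, if_neg c1, if_neg c2, if_pos c3, l1]
        rw [tax_overlay' width.toNat (width - 20).toNat 5 _ rfl (by omega)]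
        rw [List.take_of_length_le (by simp; omega)]
        rw [show width.toNat - (width - 20).toNat - 5 = 15 by omega,
          show (width - 20 - 0).toNat = (width - 20).toNat by omega]
        push_cast
        rw [show (width - (width - 20 + 5)).toNat = 15 by omega]
        simp [List.append_assoc]
      · by_cases h66 : 66 > width
        · -- first two labels
          have c1 : ¬ (66 : Int) ≤ width := by omega
          have c2 : (35 : Int) ≤ width := by omega
          have c3 : (20 : Int) ≤ width := by omega
          simp only [taxLoopA, if_neg h20, if_neg h35, if_pos h66, if_neg c1, if_pos c2,
            if_pos c3, l1, l2]
          rw [tax_overlay' width.toNat (width - 20).toNat 5 _ rfl (by omega)]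
          rw [tax_overlay (width - 20).toNat (width - 35).toNat 5 _ _ rfl (by omega)]
          rw [List.take_of_length_le (by simp; omega)]
          rw [show (width - 20).toNat - (width - 35).toNat - 5 = 10 by omega,
            show width.toNat - (width - 20).toNat - 5 = 15 by omega,
            show (width - 35 - 0).toNat = (width - 35).toNat by omega]
          push_cast
          rw [show (width - 20 - (width - 35 + 5)).toNat = 10 by omega,
            show (width - (width - 20 + 5)).toNat = 15 by omega]
          simp [List.append_assoc]
        · -- all three labels
          have c1 : (66 : Int) ≤ width := by omega
          have c2 : (35 : Int) ≤ width := by omega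
          have c3 : (20 : Int) ≤ width := by omega
          simp only [taxLoopA, if_neg h20, if_neg h35, if_neg h66, if_pos c1, if_pos c2,
            if_pos c3, l1, l2, l3]
          rw [tax_overlay' width.toNat (width - 20).toNat 5 _ rfl (by omega)]
          rw [tax_overlay (width - 20).toNat (width - 35).toNat 5 _ _ rfl (by omega)]
          rw [tax_overlay (width - 35).toNat (width - 66).toNat 6 _ _ rfl (by omega)]
          rw [List.take_of_length_le (by simp; omega)]
          rw [show (width - 35).toNat - (width - 66).toNat - 6 = 25 by omega,
            show (width - 20).toNat - (width - 35).toNat - 5 = 10 by omega,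
            show width.toNat - (width - 20).toNat - 5 = 15 by omega,
            show (width - 66 - 0).toNat = (width - 66).toNat by omega]
          push_cast
          rw [show (width - 35 - (width - 66 + 6)).toNat = 25 by omega,
            show (width - 20 - (width - 35 + 5)).toNat = 10 by omega,
            show (width - (width - 20 + 5)).toNat = 15 by omega]
          simp [List.append_assoc]
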